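-- pv_equiv track=rewrite | github.com/MRM-MB/CS_PYTHON_COMP | P8 University Sweepstake.py | WinnerWinnerChickenDinner
-- ===== SOURCE A (Python) =====
-- def WinnerWinnerChickenDinner(winner):
--     # Left to Right movement for the list of numbers
--     LeftToRight = True
--     start = 1
--     move = 1
--     StudentsNumbers = winner # All the students receive a number assigned to them which is stored in an ordered array
--
--     while StudentsNumbers > 1:
--         if LeftToRight or StudentsNumbers % 2 == 1: # Check for the direction and odd number for the remaining students
--             # Update start when from Left to Right
--             start += move
--         # Double the move and halve the StudentsNumbers
--         move *= 2
--         StudentsNumbers //= 2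
--         # Switch direction
--         LeftToRight = not LeftToRight
--     return start
-- ===== SOURCE B (Python) =====
-- def WinnerWinnerChickenDinner(winner):
--     # Closed form over winner's binary digits: with L = floor(log2(winner)),
--     # the survivor is 2**L minus 2**i for every odd i < L whose bit of winner is 0.
--     if winner < 2:
--         return 1
--     pw = 1
--     while pw * 2 <= winner:
--         pw *= 2
--     pos = pw
--     q = 2
--     m = winner // 2
--     while q < pw:
--         if m % 2 == 0:
--             pos -= q
--         q *= 4
--         m //= 4
--     return pos
-- ===== Notes on version B (the rewrite author's own statement) =====
-- stated objective: alternative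
-- what changed: B replaces A's pass-by-pass simulation (start/move accumulator halving the student count each pass) with a closed form over winner's binary digits: take the highest power of two not exceeding winner and subtract the odd-position powers whose corresponding bit of winner is zero.
import Mathlib
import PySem

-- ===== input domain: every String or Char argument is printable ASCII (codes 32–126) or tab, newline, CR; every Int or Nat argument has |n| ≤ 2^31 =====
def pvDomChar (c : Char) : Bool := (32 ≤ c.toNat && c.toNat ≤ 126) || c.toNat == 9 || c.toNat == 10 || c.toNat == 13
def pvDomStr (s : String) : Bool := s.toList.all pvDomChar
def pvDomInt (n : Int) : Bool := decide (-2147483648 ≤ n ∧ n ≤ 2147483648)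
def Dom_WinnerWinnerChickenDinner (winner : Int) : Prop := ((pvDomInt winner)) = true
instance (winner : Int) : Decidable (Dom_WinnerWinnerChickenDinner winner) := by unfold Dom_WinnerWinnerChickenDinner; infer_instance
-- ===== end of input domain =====

-- B replaces A's simulation loop by a closed form over winner's binary digits
-- (alternative algorithm; same asymptotic cost, no speed claim).

-- ===== PORT A =====
-- the while loop of A: state (LeftToRight, start, move, StudentsNumbers)
def pvALoop (ltr : Bool) (start move n : Int) : Int :=
  if _h : n > 1 then
    pvALoop (!ltr)
      (if ltr || PySem.Int.mod n 2 = 1 then start + move else start)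
      (move * 2) (PySem.Int.floordiv n 2)
  else start
termination_by n.toNat
decreasing_by
  simp only [PySem.Int.floordiv]
  rw [Int.fdiv_eq_ediv]
  simp only [show ((0:Int) ≤ 2 ∨ (2:Int) ∣ n) = True by simp, if_true]
  omega

def WinnerWinnerChickenDinner (winner : Int) : Int :=
  pvALoop true 1 1 winner

-- ===== PORT B =====
-- Source B's first while loop: double pw while pw*2 <= winner
-- (fuel only makes the recursion total; with fuel ≥ the loop's trip count it IS the loop)
def pvPow (fuel : Nat) (pw winner : Int) : Int :=
  match fuel with
  | 0 => pw
  | fuel + 1 => if pw * 2 ≤ winner then pvPow fuel (pw * 2) winner else pw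

-- Source B's second while loop: state (pos, q, m), q quadrupling, m = winner;//q shifted along
def pvSub (fuel : Nat) (pos q pw m : Int) : Int :=
  match fuel with
  | 0 => pos
  | fuel + 1 =>
      if q < pw then
        pvSub fuel (if PySem.Int.mod m 2 = 0 then pos - q else pos) (q * 4) pw
          (PySem.Int.floordiv m 4)
      else pos

def WinnerWinnerChickenDinner_alt (winner : Int) : Int :=
  if winner < 2 then 1
  else
    let pw := pvPow winner.toNat 1 winner
    pvSub winner.toNat pw 2 pw (PySem.Int.floordiv winner 2)

-- ===== PRECONDITION & SPEC =====
def Spec_WinnerWinnerChickenDinner (winner : Int) (out : Int) : Prop := out = WinnerWinnerChickenDinner_alt winner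
instance (winner : Int) (out : Int) : Decidable (Spec_WinnerWinnerChickenDinner winner out) := by unfold Spec_WinnerWinnerChickenDinner; infer_instance

-- ===== CLAIM (what is proved, stated in full; the proofs are below) =====
def Claim_equal_WinnerWinnerChickenDinner : Prop := ∀ (winner : Int), Dom_WinnerWinnerChickenDinner winner → Spec_WinnerWinnerChickenDinner winner (WinnerWinnerChickenDinner winner)

-- ===== LEMMAS AND PROOFS =====

-- proof helper: 1-based survivor position among n students, A's recursion distilled
def pvSurv (n : Int) (ltr : Bool) : Int :=
  if _h : n ≤ 1 then 1
  else
    let p := pvSurv (PySem.Int.floordiv n 2) (!ltr)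
    if ltr || PySem.Int.mod n 2 = 1 then 2 * p else 2 * p - 1
termination_by n.toNat
decreasing_by
  simp only [PySem.Int.floordiv]
  rw [Int.fdiv_eq_ediv]
  simp only [show ((0:Int) ≤ 2 ∨ (2:Int) ∣ n) = True by simp, if_true]
  omega

-- proof helper: the survivor position computed level-by-level, L = number of passes
def pvT : Nat → Bool → Int → Int
  | 0, _, _ => 1
  | L + 1, ltr, n =>
      2 * pvT L (!ltr) (PySem.Int.floordiv n 2) -
        (if ltr = false ∧ PySem.Int.mod n 2 = 0 then 1 else 0)

-- proof helper: sum of 2^j over even j < r with bit j of m equal to 0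
def pvW : Nat → Int → Int
  | 0, _ => 0
  | 1, m => if PySem.Int.mod m 2 = 0 then 1 else 0
  | r + 2, m =>
      (if PySem.Int.mod m 2 = 0 then 1 else 0) + 4 * pvW r (PySem.Int.floordiv m 4)

theorem pv_fdiv_two (n : Int) : PySem.Int.floordiv n 2 = n / 2 := by
  simp only [PySem.Int.floordiv]
  rw [Int.fdiv_eq_ediv]
  simp

theorem pv_fdiv_four (n : Int) : PySem.Int.floordiv n 4 = n / 4 := by
  simp only [PySem.Int.floordiv]
  rw [Int.fdiv_eq_ediv]
  simp

-- A's loop returns the value at the survivor's 1-based position in the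
-- arithmetic progression start, start+move, … of length n
theorem pvALoop_eq_surv (k : Nat) :
    ∀ (n : Int), n.toNat ≤ k → ∀ (ltr : Bool) (s m : Int),
      pvALoop ltr s m n = s + m * (pvSurv n ltr - 1) := by
  induction k with
  | zero =>
      intro n hk ltr s m
      rw [pvALoop, pvSurv, dif_neg (by omega), dif_pos (by omega)]
      ring
  | succ k ih =>
      intro n hk ltr s m
      by_cases h1 : n ≤ 1
      · rw [pvALoop, pvSurv, dif_neg (by omega), dif_pos h1]
        ring
      · rw [pvALoop, pvSurv, dif_pos (by omega), dif_neg h1]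
        have hfd : (PySem.Int.floordiv n 2).toNat ≤ k := by
          rw [pv_fdiv_two]; omega
        rw [ih (PySem.Int.floordiv n 2) hfd (!ltr)]
        dsimp only
        split_ifs with hc <;> ring

-- pvSurv equals the level-by-level computation on [2^L, 2^(L+1))
theorem pvSurv_eq_pvT (L : Nat) :
    ∀ (n : Int), 2 ^ L ≤ n → n < 2 ^ (L + 1) → ∀ ltr, pvSurv n ltr = pvT L ltr n := by
  induction L with
  | zero =>
      intro n h1 h2 ltr
      rw [pvSurv, dif_pos (by omega)]
      rfl
  | succ L ih =>
      intro n h1 h2 ltr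
      have hn2 : ¬ n ≤ 1 := by
        have hp : (0:Int) < 2 ^ L := pow_pos (by norm_num) L
        have : (2:Int) ≤ 2 ^ (L + 1) := by rw [pow_succ]; nlinarith
        omega
      rw [pvSurv, dif_neg hn2]
      have hb1 : 2 ^ L ≤ PySem.Int.floordiv n 2 := by
        rw [pv_fdiv_two]
        have : (2:Int) ^ (L+1) = 2 * 2 ^ L := by ring
        omega
      have hb2 : PySem.Int.floordiv n 2 < 2 ^ (L + 1) := by
        rw [pv_fdiv_two]
        have : (2:Int) ^ (L+2) = 2 * 2 ^ (L+1) := by ring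
        omega
      rw [show pvT (L+1) ltr n = 2 * pvT L (!ltr) (PySem.Int.floordiv n 2) -
            (if ltr = false ∧ PySem.Int.mod n 2 = 0 then 1 else 0) from rfl]
      rw [← ih _ hb1 hb2 (!ltr)]
      dsimp only
      rcases ltr with _ | _ <;> rcases h : decide (PySem.Int.mod n 2 = 1) with _ | _ <;>
        simp_all

-- pvT unfolds to the digit closed form readout
theorem pvT_closed (L : Nat) :
    (∀ n : Int, pvT L true n = 2 ^ L - 2 * pvW (L - 1) (PySem.Int.floordiv n 2)) ∧
    (∀ n : Int, pvT L false n = 2 ^ L - pvW L n) := by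
  induction L with
  | zero => exact ⟨fun n => rfl, fun n => rfl⟩
  | succ L ih =>
      constructor
      · intro n
        rw [show pvT (L+1) true n = 2 * pvT L false (PySem.Int.floordiv n 2) -
              (if true = false ∧ PySem.Int.mod n 2 = 0 then 1 else 0) from rfl]
        rw [ih.2]
        simp only [Nat.add_sub_cancel,
          show (true = false ∧ PySem.Int.mod n 2 = 0) ↔ False by simp, if_false]
        have : (2:Int) ^ (L+1) = 2 * 2 ^ L := by ring
        omega
      · intro n
        have hif : (if false = false ∧ PySem.Int.mod n 2 = 0 then (1:Int) else 0)
            = (if PySem.Int.mod n 2 = 0 then (1:Int) else 0) := by simp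
        rw [show pvT (L+1) false n = 2 * pvT L true (PySem.Int.floordiv n 2) -
              (if false = false ∧ PySem.Int.mod n 2 = 0 then 1 else 0) from rfl]
        rw [ih.1, hif]
        cases L with
        | zero =>
            rw [show (0:Nat) - 1 = 0 from rfl,
                show pvW 0 (PySem.Int.floordiv (PySem.Int.floordiv n 2) 2) = 0 from rfl,
                show pvW 1 n = (if PySem.Int.mod n 2 = 0 then 1 else 0) from rfl]
            split_ifs <;> norm_num
        | succ L =>
            have hdd : PySem.Int.floordiv (PySem.Int.floordiv n 2) 2
                = PySem.Int.floordiv n 4 := by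
              rw [pv_fdiv_two, pv_fdiv_two, pv_fdiv_four]
              omega
            rw [show (L+1) - 1 = L from rfl, hdd,
                show pvW (L+1+1) n = (if PySem.Int.mod n 2 = 0 then 1 else 0) +
                  4 * pvW L (PySem.Int.floordiv n 4) from rfl]
            split_ifs <;> ring

-- the first loop of B finds the top power of two
theorem pvPow_spec (fuel : Nat) :
    ∀ (j : Nat) (winner : Int), 2 ^ j ≤ winner → winner < 2 ^ j * 2 ^ fuel →
      ∃ L : Nat, pvPow fuel (2 ^ j) winner = 2 ^ L ∧ j ≤ L ∧
        2 ^ L ≤ winner ∧ winner < 2 ^ (L + 1) := by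
  induction fuel with
  | zero =>
      intro j winner h1 h2
      simp only [pow_zero, mul_one] at h2
      omega
  | succ fuel ih =>
      intro j winner h1 h2
      rw [show pvPow (fuel+1) (2^j) winner =
            (if 2^j * 2 ≤ winner then pvPow fuel (2^j * 2) winner else 2^j) from rfl]
      by_cases hc : (2:Int) ^ j * 2 ≤ winner
      · rw [if_pos hc]
        have h1' : (2:Int) ^ (j+1) ≤ winner := by rw [pow_succ]; exact hc
        have h2' : winner < 2 ^ (j+1) * 2 ^ fuel := by
          calc winner < 2 ^ j * 2 ^ (fuel+1) := h2
            _ = 2 ^ (j+1) * 2 ^ fuel := by ring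
        obtain ⟨L, hL⟩ := ih (j+1) winner h1' h2'
        exact ⟨L, by rw [show (2:Int)^j*2 = 2^(j+1) by ring]; exact hL.1, by omega, hL.2.2⟩
      · rw [if_neg hc]
        exact ⟨j, rfl, le_rfl, h1, by rw [pow_succ]; omega⟩

-- the second loop of B subtracts 2^i * (digit sum) from pos
theorem pvSub_spec (fuel : Nat) :
    ∀ (i L : Nat) (pos m : Int), L ≤ i + 2 * fuel →
      pvSub fuel pos (2 ^ i) (2 ^ L) m = pos - 2 ^ i * pvW (L - i) m := by
  induction fuel with
  | zero =>
      intro i L pos m hL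
      have : L - i = 0 := by omega
      rw [this]
      simp [pvSub, pvW]
  | succ fuel ih =>
      intro i L pos m hL
      rw [show pvSub (fuel+1) pos (2^i) (2^L) m =
            (if (2:Int)^i < 2^L then
              pvSub fuel (if PySem.Int.mod m 2 = 0 then pos - 2^i else pos) (2^i * 4) (2^L)
                (PySem.Int.floordiv m 4)
             else pos) from rfl]
      by_cases hc : (2:Int) ^ i < 2 ^ L
      · rw [if_pos hc]
        have hiL : i < L := by
          by_contra h
          exact absurd (pow_le_pow_right₀ (by norm_num : (1:Int) ≤ 2) (by omega : L ≤ i)) (by omega)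
        have h4 : (2:Int) ^ i * 4 = 2 ^ (i + 2) := by ring
        rw [h4, ih (i+2) L _ _ (by omega)]
        rcases Nat.lt_or_ge i (L - 1) with hi | hi
        · -- at least two more levels: L - i ≥ 2
          have hr : L - i = (L - (i+2)) + 2 := by omega
          rw [hr, show pvW ((L - (i+2)) + 2) m = (if PySem.Int.mod m 2 = 0 then 1 else 0) +
                4 * pvW (L - (i+2)) (PySem.Int.floordiv m 4) from rfl]
          split_ifs <;> ring
        · -- exactly one more level: L - i = 1
          have hr : L - i = 1 := by omega
          have hr2 : L - (i+2) = 0 := by omega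
          rw [hr, hr2, show pvW 1 m = if PySem.Int.mod m 2 = 0 then 1 else 0 from rfl,
              show pvW 0 (PySem.Int.floordiv m 4) = 0 from rfl]
          split_ifs <;> ring
      · rw [if_neg hc]
        have hiL : L ≤ i := by
          by_contra h
          exact hc (by
            have := pow_lt_pow_right₀ (by norm_num : (1:Int) < 2) (by omega : i < L)
            omega)
        have : L - i = 0 := by omega
        rw [this]
        simp [pvW]

theorem pv_lt_two_pow (k : Nat) : (k : Int) < 2 ^ k := by
  induction k with
  | zero => norm_num
  | succ k ih =>
      have : (2:Int) ^ (k+1) = 2 * 2 ^ k := by ring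
      push_cast
      omega

-- ===== VERDICT (by name: the statement is the Claim_ definition above) =====
theorem WinnerWinnerChickenDinner_spec : Claim_equal_WinnerWinnerChickenDinner := by
  intro winner _
  unfold Spec_WinnerWinnerChickenDinner WinnerWinnerChickenDinner WinnerWinnerChickenDinner_alt
  by_cases h2 : winner < 2
  · rw [if_pos h2, pvALoop, dif_neg (by omega)]
  · rw [if_neg h2]
    -- characterise the first loop
    have hfuel : winner < 2 ^ (0:Nat) * 2 ^ winner.toNat := by
      have := pv_lt_two_pow winner.toNat
      simp only [pow_zero, one_mul]
      omega
    obtain ⟨L, hpw, _, hLlo, hLhi⟩ :=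
      pvPow_spec winner.toNat 0 winner (by simpa using (by omega : (1:Int) ≤ winner)) hfuel
    have hL1 : 1 ≤ L := by
      by_contra h
      have : L = 0 := by omega
      rw [this] at hLhi
      norm_num at hLhi
      omega
    -- characterise the second loop
    have hLfuel : L ≤ 1 + 2 * winner.toNat := by
      have h1 := pv_lt_two_pow L
      have h2' : (2:Int) ^ L ≤ winner := hLlo
      omega
    have hsub := pvSub_spec winner.toNat 1 L (2 ^ L) (PySem.Int.floordiv winner 2) hLfuel
    simp only [pow_zero] at hpw
    rw [show ((2:Int) ^ (1:Nat)) = 2 by norm_num] at hsub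
    show pvALoop true 1 1 winner =
      pvSub winner.toNat (pvPow winner.toNat 1 winner) 2 (pvPow winner.toNat 1 winner)
        (PySem.Int.floordiv winner 2)
    rw [hpw]
    rw [hsub]
    -- A's side: pvALoop = pvSurv = pvT = the closed form
    rw [pvALoop_eq_surv winner.toNat winner le_rfl true 1 1,
        pvSurv_eq_pvT L winner hLlo hLhi true, (pvT_closed L).1 winner]
    ring
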